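-- pv_equiv track=rewrite | github.com/junghyeon0427/CodingTest | LeetCode/Perfect_Rectangle.py | isRectangleCover
-- ===== SOURCE A (Python) =====
-- from collections import defaultdict
--
-- def isRectangleCover(rectangles):
--     direct = defaultdict(int)
--     x = float('inf')
--     a = float('-inf')
--     y = float('inf')
--     b = float('-inf')
--
--     for rectangle in rectangles:
--         x1, y1, a1, b1 = rectangle
--         x = min(x, x1)
--         a = max(a, a1)
--         y = min(y, y1)
--         b = max(b, b1)
--
--     total_area = 0
--
--     for rectangle in rectangles:
--         x1, y1, a1, b1 = rectangle
--         total_area += (a1 - x1) * (b1 - y1)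
--         direct[(x1, y1)] += 1
--         direct[(x1, b1)] += 1
--         direct[(a1, b1)] += 1
--         direct[(a1, y1)] += 1
--
--     # 사각형들의 합이 전체 사각형의 합과 다른경우 -> prefect rectangle x
--
--     if total_area != (a-x) * (b-y):
--         return False
--
--     # 꼭짓점의 경우 +1을 해주어 2로 만듦
--     direct[(x, y)] += 1
--     direct[(x, b)] += 1
--     direct[(a, b)] += 1
--     direct[(a, y)] += 1
--
--     # 홀수번이 한번이라도 등장하면 prefect rectangle x
--     for i in direct.values():
--         if i % 2 != 0:
--             return False
--
--     return True
-- ===== SOURCE B (Python) =====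
-- def isRectangleCover(rectangles):
--     if not rectangles:
--         return False
--     x = min(r[0] for r in rectangles)
--     y = min(r[1] for r in rectangles)
--     a = max(r[2] for r in rectangles)
--     b = max(r[3] for r in rectangles)
--     if sum((a1 - x1) * (b1 - y1) for x1, y1, a1, b1 in rectangles) != (a - x) * (b - y):
--         return False
--     pts = sorted([(x, y), (x, b), (a, b), (a, y)]
--                  + [c for x1, y1, a1, b1 in rectangles
--                       for c in ((x1, y1), (x1, b1), (a1, b1), (a1, y1))])
--     it = iter(pts)
--     return all(p == q for p, q in zip(it, it))
-- ===== Notes on version B (the rewrite author's own statement) =====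
-- stated objective: alternative
-- what changed: A counts every corner occurrence in a defaultdict over explicit loops and then scans all counts for odd parity; B computes the bounding box and area with min/max/sum comprehensions, then SORTS the flat list of the 4n rectangle corners plus the 4 bounding corners and checks that equal corners pair up adjacently (sort-and-pair grouping instead of hash counting).
import Mathlib
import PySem

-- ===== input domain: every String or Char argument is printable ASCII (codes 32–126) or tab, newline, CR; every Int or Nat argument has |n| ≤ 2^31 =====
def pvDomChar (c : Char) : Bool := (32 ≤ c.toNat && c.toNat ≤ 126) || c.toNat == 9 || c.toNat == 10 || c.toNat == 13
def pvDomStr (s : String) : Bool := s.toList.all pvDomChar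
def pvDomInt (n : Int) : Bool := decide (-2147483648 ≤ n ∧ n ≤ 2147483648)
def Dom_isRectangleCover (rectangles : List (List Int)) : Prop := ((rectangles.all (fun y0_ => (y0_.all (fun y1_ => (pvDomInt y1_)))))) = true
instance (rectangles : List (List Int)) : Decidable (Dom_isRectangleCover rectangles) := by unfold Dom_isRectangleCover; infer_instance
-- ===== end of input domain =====

-- B replaces A's defaultdict corner counting and parity scan by sort-and-pair grouping:
-- it sorts the flat list of all 4n rectangle corners plus the 4 bounding corners and checks
-- that equal corners pair up adjacently (objective: alternative; O(n log n) vs A's O(n)).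

-- ===== PORT A =====
-- A's float('inf')/float('-inf') sentinels are modelled as Option Int (none = not yet set);
-- for a nonempty input every min/max is pure Int arithmetic, exactly as in Python.
-- body of A's first loop (min/max of the corners)
def isRectangleCoverStep1 (s : Option Int × Option Int × Option Int × Option Int)
    (r : List Int) : Option Int × Option Int × Option Int × Option Int :=
  match r with
  | [x1, y1, a1, b1] =>
      (some ((s.1).elim x1 (fun m => min m x1)),
       some ((s.2.1).elim a1 (fun m => max m a1)),
       some ((s.2.2.1).elim y1 (fun m => min m y1)),
       some ((s.2.2.2).elim b1 (fun m => max m b1)))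
  | _ => s  -- a row of length ≠ 4 raises ValueError in Python; excluded by Pre_

-- body of A's second loop (total_area and the corner-count dictionary)
def isRectangleCoverStep2 (s : Int × PySem.Dict (Int × Int) Int)
    (r : List Int) : Int × PySem.Dict (Int × Int) Int :=
  match r with
  | [x1, y1, a1, b1] =>
      (s.1 + (a1 - x1) * (b1 - y1),
       ((((s.2.modify (x1, y1) 0 (· + 1)).modify (x1, b1) 0 (· + 1)).modify
            (a1, b1) 0 (· + 1)).modify (a1, y1) 0 (· + 1)))
  | _ => s  -- excluded by Pre_

def isRectangleCover (rectangles : List (List Int)) : Bool :=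
  match rectangles.foldl isRectangleCoverStep1 (none, none, none, none) with
  | (some x, some a, some y, some b) =>
      let st := rectangles.foldl isRectangleCoverStep2 (0, PySem.Dict.empty)
      if st.1 ≠ (a - x) * (b - y) then false
      else
        (((((st.2.modify (x, y) 0 (· + 1)).modify (x, b) 0 (· + 1)).modify
              (a, b) 0 (· + 1)).modify (a, y) 0 (· + 1)).values).all
          (fun i => PySem.Int.mod i 2 == 0)
  | _ => false  -- empty input: Python's infinite bounding box makes the area test fail → False

-- ===== PORT B =====
-- tuple unpacking 'x1, y1, a1, b1 = rectangle' inside B's comprehensions (raises outside Pre_)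
def pvArea4 (r : List Int) : Int :=
  match r with
  | [x1, y1, a1, b1] => (a1 - x1) * (b1 - y1)
  | _ => 0  -- excluded by Pre_

def pvCorners4 (r : List Int) : List (Int × Int) :=
  match r with
  | [x1, y1, a1, b1] => [(x1, y1), (x1, b1), (a1, b1), (a1, y1)]
  | _ => []  -- excluded by Pre_

-- 'all(p == q for p, q in zip(it, it))' on consecutive pairs of the sorted list
def pvPairAll : List (Int × Int) → Bool
  | p :: q :: t => (p == q) && pvPairAll t
  | _ => true  -- zip drops a leftover element

def isRectangleCover_alt (rectangles : List (List Int)) : Bool :=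
  match rectangles with
  | [] => false
  | _ :: _ =>
    match PySem.List.min? (rectangles.map (fun r => PySem.List.pyGetD r 0 0)) (fun v => v) with
    | none => false  -- unreachable: min/max of a nonempty list
    | some x =>
    match PySem.List.min? (rectangles.map (fun r => PySem.List.pyGetD r 1 0)) (fun v => v) with
    | none => false
    | some y =>
    match PySem.List.max? (rectangles.map (fun r => PySem.List.pyGetD r 2 0)) (fun v => v) with
    | none => false
    | some a =>
    match PySem.List.max? (rectangles.map (fun r => PySem.List.pyGetD r 3 0)) (fun v => v) with
    | none => false
    | some b =>
      if (rectangles.map pvArea4).sum ≠ (a - x) * (b - y) then false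
      else
        pvPairAll (PySem.List.sorted2
          ([(x, y), (x, b), (a, b), (a, y)] ++ rectangles.flatMap pvCorners4)
          Prod.fst Prod.snd)

-- ===== PRECONDITION & SPEC =====
-- Pre_ excludes only rows of length ≠ 4, on which Python's tuple unpacking raises ValueError.
def Pre_isRectangleCover (rectangles : List (List Int)) : Prop :=
  ∀ r ∈ rectangles, r.length = 4
instance (rectangles : List (List Int)) : Decidable (Pre_isRectangleCover rectangles) := by
  unfold Pre_isRectangleCover; infer_instance
def pvWitness_isRectangleCover : List (List Int) := [[0, 0, 1, 1]]
def Spec_isRectangleCover (rectangles : List (List Int)) (out : Bool) : Prop := out = isRectangleCover_alt rectangles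
instance (rectangles : List (List Int)) (out : Bool) : Decidable (Spec_isRectangleCover rectangles out) := by unfold Spec_isRectangleCover; infer_instance

-- ===== CLAIM (what is proved, stated in full; the proofs are below) =====
def Claim_equal_isRectangleCover : Prop := ∀ (rectangles : List (List Int)), Dom_isRectangleCover rectangles → Pre_isRectangleCover rectangles → Spec_isRectangleCover rectangles (isRectangleCover rectangles)

-- ===== LEMMAS AND PROOFS =====

-- reference functions the extrema loops of both ports are projected onto
def pvGx (m : Int) (r : List Int) : Int := match r with | [x1, _, _, _] => min m x1 | _ => m
def pvGy (m : Int) (r : List Int) : Int := match r with | [_, y1, _, _] => min m y1 | _ => m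
def pvGa (m : Int) (r : List Int) : Int := match r with | [_, _, a1, _] => max m a1 | _ => m
def pvGb (m : Int) (r : List Int) : Int := match r with | [_, _, _, b1] => max m b1 | _ => m

def pvBump (d : PySem.Dict (Int × Int) Int) (c : Int × Int) : PySem.Dict (Int × Int) Int :=
  d.modify c 0 (· + 1)

-- Python's lexicographic ≤ on int pairs, and sorted2's strict comparator
def pvRle (p q : Int × Int) : Prop := p.1 < q.1 ∨ (p.1 = q.1 ∧ p.2 ≤ q.2)
def pvBefore (p q : Int × Int) : Bool :=
  decide (p.1 < q.1) || (!decide (q.1 < p.1) && decide (p.2 < q.2))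

theorem pvA1_proj (rs : List (List Int)) (x a y b : Int) :
    rs.foldl isRectangleCoverStep1 (some x, some a, some y, some b)
      = (some (rs.foldl pvGx x), some (rs.foldl pvGa a),
         some (rs.foldl pvGy y), some (rs.foldl pvGb b)) := by
  induction rs generalizing x a y b with
  | nil => rfl
  | cons r rs ih =>
      match r with
      | [x1, y1, a1, b1] =>
          simpa [isRectangleCoverStep1, pvGx, pvGy, pvGa, pvGb]
            using ih (min x x1) (max a a1) (min y y1) (max b b1)
      | [] => simpa [isRectangleCoverStep1, pvGx, pvGy, pvGa, pvGb] using ih x a y b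
      | [_] => simpa [isRectangleCoverStep1, pvGx, pvGy, pvGa, pvGb] using ih x a y b
      | [_, _] => simpa [isRectangleCoverStep1, pvGx, pvGy, pvGa, pvGb] using ih x a y b
      | [_, _, _] => simpa [isRectangleCoverStep1, pvGx, pvGy, pvGa, pvGb] using ih x a y b
      | _ :: _ :: _ :: _ :: _ :: _ =>
          simpa [isRectangleCoverStep1, pvGx, pvGy, pvGa, pvGb] using ih x a y b

theorem pvA1_closed (x0 y0 a0 b0 : Int) (rest : List (List Int)) :
    (([x0, y0, a0, b0] :: rest).foldl isRectangleCoverStep1 (none, none, none, none))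
      = (some (rest.foldl pvGx x0), some (rest.foldl pvGa a0),
         some (rest.foldl pvGy y0), some (rest.foldl pvGb b0)) := by
  rw [List.foldl_cons]
  exact pvA1_proj rest x0 a0 y0 b0

theorem pvA2_proj (rs : List (List Int)) (t : Int) (d : PySem.Dict (Int × Int) Int) :
    rs.foldl isRectangleCoverStep2 (t, d)
      = (t + (rs.map pvArea4).sum, (rs.flatMap pvCorners4).foldl pvBump d) := by
  induction rs generalizing t d with
  | nil => simp
  | cons r rs ih =>
      match r with
      | [x1, y1, a1, b1] =>
          rw [List.foldl_cons]
          refine (ih (t + (a1 - x1) * (b1 - y1))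
            (pvBump (pvBump (pvBump (pvBump d (x1, y1)) (x1, b1)) (a1, b1)) (a1, y1))).trans ?_
          simp only [pvArea4, pvCorners4, List.map_cons, List.sum_cons, List.flatMap_cons,
            List.foldl_append, List.foldl_cons, List.foldl_nil, pvBump, Prod.mk.injEq]
          exact ⟨by ring, by trivial⟩
      | [] => simpa [isRectangleCoverStep2, pvArea4, pvCorners4] using ih t d
      | [_] => simpa [isRectangleCoverStep2, pvArea4, pvCorners4] using ih t d
      | [_, _] => simpa [isRectangleCoverStep2, pvArea4, pvCorners4] using ih t d
      | [_, _, _] => simpa [isRectangleCoverStep2, pvArea4, pvCorners4] using ih t d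
      | _ :: _ :: _ :: _ :: _ :: _ =>
          simpa [isRectangleCoverStep2, pvArea4, pvCorners4] using ih t d

-- order facts about pvRle / pvBefore
theorem pvBefore_rle {p q : Int × Int} (h : pvBefore p q = true) : pvRle p q := by
  rcases p with ⟨p1, p2⟩; rcases q with ⟨q1, q2⟩
  simp [pvBefore] at h; simp [pvRle]; omega

theorem pvNotBefore_rle {p q : Int × Int} (h : ¬ pvBefore p q = true) : pvRle q p := by
  rcases p with ⟨p1, p2⟩; rcases q with ⟨q1, q2⟩
  simp [pvBefore] at h; simp [pvRle]; omega

theorem pvRle_trans {p q r : Int × Int} (h1 : pvRle p q) (h2 : pvRle q r) : pvRle p r := by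
  rcases p with ⟨p1, p2⟩; rcases q with ⟨q1, q2⟩; rcases r with ⟨r1, r2⟩
  simp [pvRle] at *; omega

theorem pvRle_antisymm {p q : Int × Int} (h1 : pvRle p q) (h2 : pvRle q p) : p = q := by
  rcases p with ⟨p1, p2⟩; rcases q with ⟨q1, q2⟩
  simp [pvRle] at *; omega

-- sorted2 with fst/snd keys IS the insertBy fold with the lexicographic comparator
theorem pvSorted2_eq (xs : List (Int × Int)) :
    PySem.List.sorted2 xs Prod.fst Prod.snd false
      = xs.foldl (fun acc x => PySem.List.insertBy pvBefore x acc) [] := rfl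

theorem pvInsertBy_pairwise (x : Int × Int) (l : List (Int × Int))
    (h : l.Pairwise pvRle) : (PySem.List.insertBy pvBefore x l).Pairwise pvRle := by
  induction l with
  | nil => simp [PySem.List.insertBy]
  | cons y ys ih =>
      rw [show PySem.List.insertBy pvBefore x (y :: ys)
            = if pvBefore x y then x :: y :: ys else y :: PySem.List.insertBy pvBefore x ys from rfl]
      rcases List.pairwise_cons.mp h with ⟨hy, hys⟩
      split_ifs with hb
      · refine List.pairwise_cons.mpr ⟨?_, h⟩
        intro z hz
        rcases List.mem_cons.mp hz with rfl | hz
        · exact pvBefore_rle hb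
        · exact pvRle_trans (pvBefore_rle hb) (hy z hz)
      · refine List.pairwise_cons.mpr ⟨?_, ih hys⟩
        intro z hz
        rcases (PySem.List.mem_insertBy pvBefore x z ys).mp hz with rfl | hz
        · exact pvNotBefore_rle hb
        · exact hy z hz

theorem pvSorted2_pairwise (xs : List (Int × Int)) :
    (PySem.List.sorted2 xs Prod.fst Prod.snd false).Pairwise pvRle := by
  rw [pvSorted2_eq]
  have h : ∀ (l acc : List (Int × Int)), acc.Pairwise pvRle →
      (l.foldl (fun acc x => PySem.List.insertBy pvBefore x acc) acc).Pairwise pvRle := by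
    intro l
    induction l with
    | nil => intro acc h; simpa using h
    | cons z l ih => intro acc h; exact ih _ (pvInsertBy_pairwise z acc h)
  exact h xs [] List.Pairwise.nil

-- on a lexicographically sorted list of even length, "consecutive pairs are equal"
-- is exactly "every element occurs an even number of times"
theorem pvPairAll_iff (n : Nat) (s : List (Int × Int)) (hn : s.length = n)
    (hs : s.Pairwise pvRle) (hl : Even s.length) :
    pvPairAll s = true ↔ ∀ p, Even (s.count p) := by
  induction n using Nat.strong_induction_on generalizing s with
  | _ n ih =>
    match s, hn with
    | [], _ => simp [pvPairAll]
    | [p], hn => simp at hl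
    | p :: q :: t, hn =>
      rcases List.pairwise_cons.mp hs with ⟨hp, hs'⟩
      rcases List.pairwise_cons.mp hs' with ⟨hq, ht⟩
      have hlt : Even t.length := by
        rcases hl with ⟨k, hk⟩
        simp only [List.length_cons] at hk
        exact ⟨k - 1, by omega⟩
      have iht := ih t.length (by simp only [List.length_cons] at hn; omega) t rfl ht hlt
      constructor
      · intro h r
        rw [show pvPairAll (p :: q :: t) = ((p == q) && pvPairAll t) from rfl,
            Bool.and_eq_true, beq_iff_eq] at h
        rcases h with ⟨rfl, h2⟩
        rcases (iht.mp h2) r with ⟨k, hk⟩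
        simp only [List.count_cons, hk]
        split_ifs
        · exact ⟨k + 1, by omega⟩
        · exact ⟨k, by omega⟩
      · intro h
        have hpq : p = q := by
          rcases h p with ⟨k, hk⟩
          have hmem : p ∈ q :: t := by
            by_contra hnm
            have hz : (q :: t).count p = 0 := List.count_eq_zero.mpr hnm
            rw [List.count_cons_self, hz] at hk
            omega
          rcases List.mem_cons.mp hmem with hq' | hmt
          · exact hq'
          · exact pvRle_antisymm (hp q (by simp)) (hq p hmt)
        subst hpq
        have hct : ∀ r, Even (t.count r) := by
          intro r
          rcases h r with ⟨k, hk⟩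
          simp only [List.count_cons] at hk
          split_ifs at hk
          · exact ⟨k - 1, by omega⟩
          · exact ⟨k, by omega⟩
        rw [show pvPairAll (p :: p :: t) = ((p == p) && pvPairAll t) from rfl]
        simp [iht.mpr hct]

theorem pvMod2 (n : Nat) : ((PySem.Int.mod (n : Int) 2 == 0) = true) ↔ Even n := by
  have h : PySem.Int.mod (n : Int) 2 = ((n % 2 : Nat) : Int) := by
    exact_mod_cast PySem.Int.mod_natCast n 2
  rw [h, beq_iff_eq, Nat.even_iff]
  constructor <;> intro h2 <;> omega

-- A's "every corner count is even" as a statement about List.count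
theorem pvAllEven (L : List (Int × Int)) :
    (((PySem.Dict.counter L).values.all (fun i => PySem.Int.mod i 2 == 0)) = true)
      ↔ ∀ p, Even (L.count p) := by
  rw [PySem.Dict.values_eq_map_keys _ (PySem.Dict.nodup_keys_counter L) 0,
      PySem.Dict.keys_counter, List.all_eq_true]
  constructor
  · intro h p
    by_cases hp : p ∈ L
    · have h2 := h _ (List.mem_map_of_mem ((PySem.Set.mem_ofList L p).mpr hp))
      rw [PySem.Dict.getD_counter] at h2
      exact (pvMod2 _).mp h2
    · simp [List.count_eq_zero.mpr hp]
  · intro h i hi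
    rcases List.mem_map.mp hi with ⟨k, hk, rfl⟩
    rw [PySem.Dict.getD_counter]
    exact (pvMod2 _).mpr (h k)

-- the final four bounding-corner bumps turn A's dictionary into counter (corners ++ B4)
theorem pvDictFinal (l : List (Int × Int)) (c1 c2 c3 c4 : Int × Int) :
    (((((l.foldl pvBump PySem.Dict.empty).modify c1 0 (· + 1)).modify c2 0 (· + 1)).modify
          c3 0 (· + 1)).modify c4 0 (· + 1))
      = PySem.Dict.counter (l ++ [c1, c2, c3, c4]) := by
  rw [PySem.Dict.counter_eq_foldl, List.foldl_append]
  rfl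

-- row projections under Pre_
theorem pvGetD_row (m : Int) (r : List Int) (h : r.length = 4) :
    min m (PySem.List.pyGetD r 0 0) = pvGx m r
    ∧ min m (PySem.List.pyGetD r 1 0) = pvGy m r
    ∧ max m (PySem.List.pyGetD r 2 0) = pvGa m r
    ∧ max m (PySem.List.pyGetD r 3 0) = pvGb m r := by
  match r, h with
  | [x1, y1, a1, b1], _ => exact ⟨rfl, rfl, rfl, rfl⟩

-- the corners list always has even length (each row contributes 4 or 0)
theorem pvCornersLenEven (rs : List (List Int)) : Even (rs.flatMap pvCorners4).length := by
  induction rs with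
  | nil => simp
  | cons r rs ih =>
      rw [List.flatMap_cons, List.length_append]
      have h : (pvCorners4 r).length = 0 ∨ (pvCorners4 r).length = 4 := by
        unfold pvCorners4; split <;> simp
      rcases ih with ⟨k, hk⟩
      rcases h with h | h
      · exact ⟨k, by omega⟩
      · exact ⟨k + 2, by omega⟩

-- ===== VERDICT (by name: the statement is the Claim_ definition above) =====
theorem isRectangleCover_spec : Claim_equal_isRectangleCover := by
  intro rs _ hpre
  unfold Spec_isRectangleCover
  match rs, hpre with
  | [], _ => rfl
  | r0 :: rest, hpre =>
    have h0 : r0.length = 4 := hpre r0 (by simp)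
    match r0, h0 with
    | [x0, y0, a0, b0], _ =>
      unfold isRectangleCover isRectangleCover_alt
      rw [pvA1_closed]
      -- B's min/max of comprehensions = A's running extrema
      have hrest : ∀ r ∈ rest, r.length = 4 := fun r hr => hpre r (List.mem_cons_of_mem _ hr)
      have hx : PySem.List.min? ((([x0, y0, a0, b0] : List Int) :: rest).map
            (fun r => PySem.List.pyGetD r 0 0)) (fun v => v) = some (rest.foldl pvGx x0) := by
        rw [List.map_cons, PySem.List.min?_id_cons, List.foldl_map]
        congr 1
        exact PySem.List.foldl_congr_mem rest _ _ _
          (fun m r hr => (pvGetD_row m r (hrest r hr)).1)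
      have hy : PySem.List.min? ((([x0, y0, a0, b0] : List Int) :: rest).map
            (fun r => PySem.List.pyGetD r 1 0)) (fun v => v) = some (rest.foldl pvGy y0) := by
        rw [List.map_cons, PySem.List.min?_id_cons, List.foldl_map]
        congr 1
        exact PySem.List.foldl_congr_mem rest _ _ _
          (fun m r hr => (pvGetD_row m r (hrest r hr)).2.1)
      have ha : PySem.List.max? ((([x0, y0, a0, b0] : List Int) :: rest).map
            (fun r => PySem.List.pyGetD r 2 0)) (fun v => v) = some (rest.foldl pvGa a0) := by
        rw [List.map_cons, PySem.List.max?_id_cons, List.foldl_map]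
        congr 1
        exact PySem.List.foldl_congr_mem rest _ _ _
          (fun m r hr => (pvGetD_row m r (hrest r hr)).2.2.1)
      have hb : PySem.List.max? ((([x0, y0, a0, b0] : List Int) :: rest).map
            (fun r => PySem.List.pyGetD r 3 0)) (fun v => v) = some (rest.foldl pvGb b0) := by
        rw [List.map_cons, PySem.List.max?_id_cons, List.foldl_map]
        congr 1
        exact PySem.List.foldl_congr_mem rest _ _ _
          (fun m r hr => (pvGetD_row m r (hrest r hr)).2.2.2)
      rw [hx, hy, ha, hb]
      simp only [pvA2_proj, zero_add]
      split_ifs with h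
      · rfl
      · -- parity check: A's even-count scan = B's sort-and-pair test
        set L := (([x0, y0, a0, b0] :: rest).flatMap pvCorners4) with hL
        set X := rest.foldl pvGx x0
        set Y := rest.foldl pvGy y0
        set A := rest.foldl pvGa a0
        set B := rest.foldl pvGb b0
        rw [pvDictFinal L (X, Y) (X, B) (A, B) (A, Y)]
        set L' := ([((X : Int), (Y : Int)), (X, B), (A, B), (A, Y)] ++ L) with hL'
        have hperm : (PySem.List.sorted2 L' Prod.fst Prod.snd false).Perm L' :=
          PySem.List.sorted2_perm _ _ _ _
        have hcl := pvCornersLenEven ([x0, y0, a0, b0] :: rest)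
        rw [← hL] at hcl
        have hlen : Even (PySem.List.sorted2 L' Prod.fst Prod.snd false).length := by
          rcases hcl with ⟨k, hk⟩
          rw [hperm.length_eq, hL', List.length_append, hk]
          simp only [List.length_cons, List.length_nil]
          exact ⟨k + 2, by omega⟩
        rw [Bool.eq_iff_iff, pvAllEven,
            pvPairAll_iff _ _ rfl (pvSorted2_pairwise L') hlen]
        constructor <;> intro hcount p
        · rw [hperm.count_eq, hL', List.count_append]
          have h1 := hcount p
          rw [List.count_append] at h1
          rwa [Nat.add_comm]
        · have h1 := hcount p
          rw [hperm.count_eq, hL', List.count_append] at h1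
          rw [List.count_append]
          rwa [Nat.add_comm]
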